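-- pv_equiv track=rewrite | github.com/SatoMichi/Mahjong_in_Python | JudgeRon.py | noyaojiu
-- ===== SOURCE A (Python) =====
-- def noyaojiu(hand,openHand):
--     ron = True
--     yao13 = [0,8,9,17,18,26,27,28,29,30,31,32,33]
--     for i in yao13:
--         for h in hand:
--             for s_h in h:
--                 if(i==s_h[0]):
--                     ron = ron and False
--         for oph in openHand:
--             for s_oph in oph:
--                 if(i==s_oph[0]):
--                     ron = ron and False
--     return ron
-- ===== SOURCE B (Python) =====
-- def noyaojiu(hand, openHand):
--     firsts = {s[0] for h in hand for s in h} | {s[0] for oph in openHand for s in oph}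
--     return {0, 8, 9, 17, 18, 26, 27, 28, 29, 30, 31, 32, 33}.isdisjoint(firsts)
-- ===== Notes on version B (the rewrite author's own statement) =====
-- stated objective: simpler
-- what changed: Builds the set of first tile codes in one flattening pass and replaces the 13-iteration outer rescan (with its ron = ron and False accumulator) by a single set-disjointness test against the terminal/honor codes.
import Mathlib
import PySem

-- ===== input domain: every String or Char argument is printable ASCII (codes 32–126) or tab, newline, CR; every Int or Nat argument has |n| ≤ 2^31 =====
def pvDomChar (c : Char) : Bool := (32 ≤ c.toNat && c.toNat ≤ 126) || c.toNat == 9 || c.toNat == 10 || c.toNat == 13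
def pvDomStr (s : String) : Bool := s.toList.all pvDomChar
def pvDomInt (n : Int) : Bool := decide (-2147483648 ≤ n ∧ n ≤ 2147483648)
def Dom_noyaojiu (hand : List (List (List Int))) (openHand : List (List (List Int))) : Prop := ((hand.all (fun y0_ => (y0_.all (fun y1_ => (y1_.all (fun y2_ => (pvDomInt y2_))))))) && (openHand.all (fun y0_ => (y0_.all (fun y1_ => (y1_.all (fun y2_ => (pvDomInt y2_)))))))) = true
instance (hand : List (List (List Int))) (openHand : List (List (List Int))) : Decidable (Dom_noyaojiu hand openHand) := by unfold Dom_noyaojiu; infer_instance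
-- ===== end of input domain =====

-- B replaces the 13-iteration outer rescan of A by one flattened first-tile set and a single disjointness test (simpler).


-- ===== PORT A =====
-- s[0]: exact via PySem.List.pyGet?; Pre_ guarantees the index is in range, so getD 0 is never the default
def pvFirst (s : List Int) : Int := (PySem.List.pyGet? s 0).getD 0

def noyaojiu (hand : List (List (List Int))) (openHand : List (List (List Int))) : Bool :=
  let yao13 : List Int := [0,8,9,17,18,26,27,28,29,30,31,32,33]
  yao13.foldl (fun ron i =>
    let ron := hand.foldl (fun ron h =>
      h.foldl (fun ron s_h => if i = pvFirst s_h then ron && false else ron) ron) ron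
    openHand.foldl (fun ron oph =>
      oph.foldl (fun ron s_oph => if i = pvFirst s_oph then ron && false else ron) ron) ron) true

-- ===== PORT B =====
def noyaojiu_alt (hand : List (List (List Int))) (openHand : List (List (List Int))) : Bool :=
  let firsts : PySem.Set Int :=
    PySem.Set.union (PySem.Set.ofList ((hand.flatMap (fun h => h)).map pvFirst))
                    (PySem.Set.ofList ((openHand.flatMap (fun oph => oph)).map pvFirst))
  PySem.Set.isdisjoint (PySem.Set.ofList [0,8,9,17,18,26,27,28,29,30,31,32,33]) firsts

-- ===== PRECONDITION & SPEC =====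
-- Pre_ excludes inputs containing an empty innermost tile list: there s[0] raises IndexError in A (and in B alike)
def Pre_noyaojiu (hand : List (List (List Int))) (openHand : List (List (List Int))) : Prop :=
  (∀ h ∈ hand, ∀ s ∈ h, s ≠ []) ∧ (∀ oph ∈ openHand, ∀ s ∈ oph, s ≠ [])
instance (hand : List (List (List Int))) (openHand : List (List (List Int))) : Decidable (Pre_noyaojiu hand openHand) := by unfold Pre_noyaojiu; infer_instance

def pvWitness_noyaojiu : List (List (List Int)) × List (List (List Int)) := ([[[1,1,1],[2,3,4]]], [[[5,6,7]]])

def Spec_noyaojiu (hand : List (List (List Int))) (openHand : List (List (List Int))) (out : Bool) : Prop := out = noyaojiu_alt hand openHand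
instance (hand : List (List (List Int))) (openHand : List (List (List Int))) (out : Bool) : Decidable (Spec_noyaojiu hand openHand out) := by unfold Spec_noyaojiu; infer_instance

-- ===== CLAIM (what is proved, stated in full; the proofs are below) =====
def Claim_equal_noyaojiu : Prop := ∀ (hand : List (List (List Int))) (openHand : List (List (List Int))), Dom_noyaojiu hand openHand → Pre_noyaojiu hand openHand → Spec_noyaojiu hand openHand (noyaojiu hand openHand)

-- ===== LEMMAS AND PROOFS =====

-- inner loop of A: a fold that can only switch the flag off is 'b && none matched'
theorem pv_foldl_andoff {α : Type} (p : α → Prop) [DecidablePred p] (l : List α) (b : Bool) :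
    l.foldl (fun r x => if p x then r && false else r) b
      = (b && l.all (fun x => decide ¬ p x)) := by
  induction l generalizing b with
  | nil => simp
  | cons x xs ih =>
    rw [List.foldl_cons]
    by_cases h : p x
    · rw [if_pos h, ih]; simp [h]
    · rw [if_neg h, ih]; simp [h]

-- middle loop: two nested folds collapse to an 'all' over the flattened list
theorem pv_foldl_nested {α : Type} (p : α → Prop) [DecidablePred p] (l : List (List α)) (b : Bool) :
    l.foldl (fun r h => h.foldl (fun r x => if p x then r && false else r) r) b
      = (b && l.all (fun h => h.all (fun x => decide ¬ p x))) := by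
  induction l generalizing b with
  | nil => simp
  | cons h t ih =>
    rw [List.foldl_cons, pv_foldl_andoff, ih]; simp [Bool.and_assoc]

-- outer loop: the per-tile step is 'flag && (clear in hand && clear in openHand)'
theorem pv_foldl_two {α : Type} (a c : α → Bool) (l : List α) (b : Bool) :
    l.foldl (fun r i => (r && a i) && c i) b = (b && l.all (fun i => a i && c i)) := by
  induction l generalizing b with
  | nil => simp
  | cons x xs ih =>
    rw [List.foldl_cons, ih]; simp [Bool.and_assoc]

theorem pv_noyaojiu_eq_all (hand openHand : List (List (List Int))) :
    noyaojiu hand openHand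
      = ([0,8,9,17,18,26,27,28,29,30,31,32,33] : List Int).all (fun i =>
          hand.all (fun h => h.all (fun s => decide ¬ (i = pvFirst s)))
          && openHand.all (fun h => h.all (fun s => decide ¬ (i = pvFirst s)))) := by
  unfold noyaojiu
  simp only [pv_foldl_nested]
  rw [pv_foldl_two, Bool.true_and]

theorem pv_alt_gen (L : List Int) (hand openHand : List (List (List Int))) :
    PySem.Set.isdisjoint (PySem.Set.ofList L)
        (PySem.Set.union (PySem.Set.ofList ((hand.flatMap (fun h => h)).map pvFirst))
                         (PySem.Set.ofList ((openHand.flatMap (fun oph => oph)).map pvFirst)))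
      = L.all (fun i =>
          hand.all (fun h => h.all (fun s => decide ¬ (i = pvFirst s)))
          && openHand.all (fun h => h.all (fun s => decide ¬ (i = pvFirst s)))) := by
  apply Bool.eq_iff_iff.mpr
  rw [PySem.Set.isdisjoint_iff]
  simp only [List.all_eq_true, Bool.and_eq_true, PySem.Set.mem_ofList, PySem.Set.mem_union,
    List.mem_map, List.mem_flatMap, decide_eq_true_eq, not_exists, not_or, not_and]
  constructor
  · intro hd i hi
    obtain ⟨h1, h2⟩ := hd i hi
    exact ⟨fun h hh s hs e => h1 s ⟨h, hh, hs⟩ e.symm,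
           fun h hh s hs e => h2 s ⟨h, hh, hs⟩ e.symm⟩
  · intro hd i hi
    obtain ⟨h1, h2⟩ := hd i hi
    exact ⟨fun s hs e => (fun ⟨h, hh, hsh⟩ => h1 h hh s hsh e.symm) hs,
           fun s hs e => (fun ⟨h, hh, hsh⟩ => h2 h hh s hsh e.symm) hs⟩

-- ===== VERDICT (by name: the statement is the Claim_ definition above) =====
theorem noyaojiu_spec : Claim_equal_noyaojiu := by
  intro hand openHand _ _
  unfold Spec_noyaojiu noyaojiu_alt
  rw [pv_noyaojiu_eq_all, pv_alt_gen]
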